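-- pv_equiv track=rewrite | github.com/imanmay2/PYTHON-PROGRAMMING | PROGRAMS/Q 3 TKINTER PRACTISE.py | hexa_deci_char
-- ===== SOURCE A (Python) =====
-- def hexa_deci_char(num):
--     #hexadecimal to decimal
--     li2=grp(num)
--     li3=list()
--     for i in li2:
--         li3.append(int(i,16)) # shortcut to be changed later...change this
--     str4=''
--     for i in li3:
--         str4+=chr(i)
--     return str4
--
-- def grp(num):
--     str1=''
--     ct=0
--     li=list()
--     for i in num:
--         str1+=i
--         ct=ct+1
--         if(ct==2):
--             li.append(str1)
--             str1=''
--             ct=0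
--     return li
-- ===== SOURCE B (Python) =====
-- def hexa_deci_char(num):
--     it = iter(num)
--     return ''.join(chr(int(a + b, 16)) for a, b in zip(it, it))
-- ===== Notes on version B (the rewrite author's own statement) =====
-- stated objective: idiomatic
-- what changed: Replaces A's three passes (a counter-driven grouping loop building an intermediate list of pair-strings, an int-conversion loop building a second list, and a string-concatenation loop) by a single pass that pairs consecutive characters with zip over one shared iterator and joins the converted characters directly.
import Mathlib
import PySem

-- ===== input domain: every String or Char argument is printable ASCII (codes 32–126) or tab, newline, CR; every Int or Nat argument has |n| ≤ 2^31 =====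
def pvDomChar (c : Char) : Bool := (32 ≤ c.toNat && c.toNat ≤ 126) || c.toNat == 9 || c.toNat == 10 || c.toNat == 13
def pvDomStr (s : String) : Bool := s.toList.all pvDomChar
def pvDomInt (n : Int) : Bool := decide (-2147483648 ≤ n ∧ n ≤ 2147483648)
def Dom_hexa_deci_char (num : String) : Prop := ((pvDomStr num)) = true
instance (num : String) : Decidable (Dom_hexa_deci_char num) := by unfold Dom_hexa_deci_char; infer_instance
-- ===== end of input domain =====

-- B replaces A's three passes (counter grouping loop, conversion loop, join loop) by one
-- zip-paired single pass; objective: idiomatic, same O(n) cost.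

-- ===== PORT A =====
-- helper grp: counter loop collecting two-char groups (state: str1, ct, li)
def pvGrp (num : List Char) : List (List Char) :=
  (num.foldl
    (fun (st : List Char × Int × List (List Char)) i =>
      let str1 := st.1 ++ [i]
      let ct := st.2.1 + 1
      if ct = 2 then (([], 0, st.2.2 ++ [str1]) : List Char × Int × List (List Char))
      else (str1, ct, st.2.2))
    ([], 0, [])).2.2

def hexa_deci_char (num : String) : String :=
  let li2 := pvGrp num.toList
  -- int(i, 16) is PySem.Int.ofCharsBase?; Pre_ rules out the `none` (ValueError) case
  let li3 := li2.foldl (fun (acc : List Int) i => acc ++ [(PySem.Int.ofCharsBase? i 16).getD 0]) []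
  -- chr(i) is Char.ofNat; Pre_ rules out negative values (ValueError in Python's chr)
  let str4 := li3.foldl (fun (s : List Char) i => s ++ [Char.ofNat i.toNat]) []
  String.ofList str4

-- ===== PORT B =====
-- zip(it, it) over one shared iterator = consecutive disjoint pairs, dropping a trailing odd char
def pvPairUp : List Char → List (Char × Char)
  | [] => []
  | [_] => []
  | a :: b :: t => (a, b) :: pvPairUp t

def hexa_deci_char_alt (num : String) : String :=
  String.ofList ((pvPairUp num.toList).map
    (fun p => Char.ofNat ((PySem.Int.ofCharsBase? [p.1, p.2] 16).getD 0).toNat))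

-- ===== PRECONDITION & SPEC =====
-- Pre_ excludes exactly the inputs where Python A raises: a two-char group that is not a
-- valid base-16 int literal (ValueError in int) or that parses negative (ValueError in chr).
def pvPairsHexOK : List Char → Bool
  | [] => true
  | [_] => true
  | a :: b :: t =>
      (match PySem.Int.ofCharsBase? [a, b] 16 with
       | some k => decide (0 ≤ k)
       | none => false) && pvPairsHexOK t

def Pre_hexa_deci_char (num : String) : Prop := pvPairsHexOK num.toList = true
instance (num : String) : Decidable (Pre_hexa_deci_char num) := by
  unfold Pre_hexa_deci_char; infer_instance

def pvWitness_hexa_deci_char : String := "48656c6c6f"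

def Spec_hexa_deci_char (num : String) (out : String) : Prop := out = hexa_deci_char_alt num
instance (num : String) (out : String) : Decidable (Spec_hexa_deci_char num out) := by
  unfold Spec_hexa_deci_char; infer_instance

-- ===== CLAIM (what is proved, stated in full; the proofs are below) =====
def Claim_equal_hexa_deci_char : Prop := ∀ (num : String), Dom_hexa_deci_char num → Pre_hexa_deci_char num → Spec_hexa_deci_char num (hexa_deci_char num)

-- ===== LEMMAS AND PROOFS =====

-- the grp fold, started with any accumulated groups, appends the disjoint pairs of cs
theorem pvGrp_fold (cs : List Char) (acc : List (List Char)) :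
    (cs.foldl
      (fun (st : List Char × Int × List (List Char)) i =>
        let str1 := st.1 ++ [i]
        let ct := st.2.1 + 1
        if ct = 2 then (([], 0, st.2.2 ++ [str1]) : List Char × Int × List (List Char))
        else (str1, ct, st.2.2))
      ([], 0, acc)).2.2 = acc ++ (pvPairUp cs).map (fun p => [p.1, p.2]) := by
  induction cs using pvPairUp.induct generalizing acc with
  | case1 => simp [pvPairUp]
  | case2 a => simp [pvPairUp, List.foldl]
  | case3 a b t ih =>
      simp only [List.foldl, pvPairUp]
      norm_num
      rw [ih]
      simp

theorem pvGrp_eq (cs : List Char) :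
    pvGrp cs = (pvPairUp cs).map (fun p => [p.1, p.2]) := by
  simpa using pvGrp_fold cs []

-- ===== VERDICT (by name: the statement is the Claim_ definition above) =====
theorem hexa_deci_char_spec : Claim_equal_hexa_deci_char := by
  intro num _ _
  unfold Spec_hexa_deci_char hexa_deci_char hexa_deci_char_alt
  simp only [pvGrp_eq, PySem.List.foldl_append_singleton_eq_map, List.map_map, List.nil_append]
  rfl
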